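-- pv_equiv track=rewrite | github.com/pypi-data/pypi-mirror-401 | packages/metanetmap/metanetmap-1.1.2.tar.gz/metanetmap-1.1.2/src/metanetmap/utils.py | build_similarity_graph
-- ===== SOURCE A (Python) =====
-- from collections import defaultdict
--
-- def split_and_clean(val):
--     """
--     Splits a string on '_AND_' and removes surrounding whitespace
--     from each part.
--
--     Args:
--         val (str): Input string, possibly containing multiple values
--         joined by '_AND_'.
--
--     Returns:
--         set: A set of cleaned individual values.
--     """
--     if isinstance(val, str):
--         return set(v.strip() for v in val.split("_AND_") if v.strip())
--     return set()
--
-- def build_similarity_graph(dicts, keys_to_check):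
--     """
--     Builds a graph where nodes represent dictionaries and edges indicate
--     similarity based on overlapping values in specified keys.
--
--     Args:
--         dicts (list of dict): List of dictionaries to compare.
--         keys_to_check (list of str): Keys to compare across dictionaries.
--
--     Returns:
--         graph (dict): A graph represented as an adjacency list.
--     """
--     graph = defaultdict(set)
--     for i, d1 in enumerate(dicts):
--         for j, d2 in enumerate(dicts):
--             if i >= j:
--                 continue
--             for key in keys_to_check:
--                 v1 = split_and_clean(d1.get(key, ""))
--                 v2 = split_and_clean(d2.get(key, ""))
--                 if v1 & v2:
--                     graph[i].add(j)
--                     graph[j].add(i)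
--                     break
--     return graph
-- ===== SOURCE B (Python) =====
-- from collections import defaultdict
--
-- def split_and_clean(val):
--     if isinstance(val, str):
--         return set(v.strip() for v in val.split("_AND_") if v.strip())
--     return set()
--
-- def build_similarity_graph(dicts, keys_to_check):
--     # Inverted index: (key, cleaned value) -> indices of dicts carrying it.
--     entries = [((key, v), i)
--                for i, d in enumerate(dicts)
--                for key in keys_to_check
--                for v in split_and_clean(d.get(key, ""))]
--     index = defaultdict(list)
--     for kv, i in entries:
--         index[kv].append(i)
--     # Any two distinct indices sharing a bucket are similar.
--     edges = set()
--     for idxs in index.values():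
--         for p, i in enumerate(idxs):
--             for j in idxs[p + 1:]:
--                 if i != j:
--                     edges.add((min(i, j), max(i, j)))
--     graph = defaultdict(set)
--     for i, j in sorted(edges):
--         graph[i].add(j)
--         graph[j].add(i)
--     return graph
-- ===== Notes on version B (the rewrite author's own statement) =====
-- stated objective: faster
-- what changed: Replaces A's all-pairs nested scan (which re-splits and re-cleans every value for every pair) with an inverted index mapping (key, cleaned value) to the list of dict indices, so edges are collected only from indices that actually share a bucket, then replayed in sorted order to rebuild the same adjacency dict.
import Mathlib
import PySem

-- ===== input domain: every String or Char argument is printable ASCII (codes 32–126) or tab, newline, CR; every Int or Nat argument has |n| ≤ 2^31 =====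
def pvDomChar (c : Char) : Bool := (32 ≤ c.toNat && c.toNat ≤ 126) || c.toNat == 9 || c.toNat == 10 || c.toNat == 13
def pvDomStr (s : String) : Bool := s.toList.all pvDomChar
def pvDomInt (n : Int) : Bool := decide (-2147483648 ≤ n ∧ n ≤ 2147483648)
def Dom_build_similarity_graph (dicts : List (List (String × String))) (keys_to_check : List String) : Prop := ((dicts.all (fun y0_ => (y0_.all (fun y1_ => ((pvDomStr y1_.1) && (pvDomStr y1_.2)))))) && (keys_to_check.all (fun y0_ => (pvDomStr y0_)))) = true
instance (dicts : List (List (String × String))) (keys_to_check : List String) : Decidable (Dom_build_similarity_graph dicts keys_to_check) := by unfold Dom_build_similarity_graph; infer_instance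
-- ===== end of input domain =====

-- B replaces A's all-pairs O(n^2·k) scan by an inverted index (key, cleaned value) → indices,
-- collecting edges only from indices that share a bucket (objective: faster on sparse data).

-- ===== PORT A =====
-- helper shared by Source A and Source B (both define the identical split_and_clean)
def split_and_clean (val : String) : PySem.Set String :=
  PySem.Set.ofList
    ((((PySem.Str.split? val "_AND_").getD []).filter
        (fun v => decide (PySem.Str.strip v ≠ ""))).map PySem.Str.strip)

-- graph[i].add(j); graph[j].add(i)  on a defaultdict(set) — used verbatim by both Source A and Source B
def pvAddEdge (g : PySem.Dict Int (PySem.Set Int)) (i j : Int) : PySem.Dict Int (PySem.Set Int) :=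
  let g1 := g.insert i ((g.getD i PySem.Set.empty).add j)
  g1.insert j ((g1.getD j PySem.Set.empty).add i)

-- A's inner 'for key in keys_to_check: … break' loop
def pvConnA (d1 d2 : List (String × String)) (keys : List String) : Bool :=
  match keys with
  | [] => false
  | k :: ks =>
    if (PySem.Set.inter (split_and_clean ((PySem.Dict.mk d1).getD k ""))
          (split_and_clean ((PySem.Dict.mk d2).getD k ""))) ≠ [] then true
    else pvConnA d1 d2 ks

def build_similarity_graph (dicts : List (List (String × String))) (keys_to_check : List String) : List (Int × List Int) :=
  ((PySem.List.enumerate dicts).foldl (fun g p =>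
    (PySem.List.enumerate dicts).foldl (fun g q =>
      if p.1 ≥ q.1 then g
      else if pvConnA p.2 q.2 keys_to_check then pvAddEdge g p.1 q.1 else g) g)
    PySem.Dict.empty).items

-- ===== PORT B =====
def build_similarity_graph_alt (dicts : List (List (String × String))) (keys_to_check : List String) : List (Int × List Int) :=
  let entries : List ((String × String) × Int) :=
    (PySem.List.enumerate dicts).flatMap (fun p =>
      keys_to_check.flatMap (fun k =>
        (split_and_clean ((PySem.Dict.mk p.2).getD k "")).map (fun v => ((k, v), p.1))))
  let index : PySem.Dict (String × String) (List Int) :=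
    entries.foldl (fun d e => d.modify e.1 [] (fun l => l ++ [e.2])) PySem.Dict.empty
  let edges : PySem.Set (Int × Int) :=
    index.values.foldl (fun es idxs =>
      (PySem.List.enumerate idxs).foldl (fun es p =>
        (PySem.List.slice idxs (some (p.1 + 1)) none).foldl (fun es j =>
          if p.2 ≠ j then PySem.Set.add es (min p.2 j, max p.2 j) else es) es) es)
      PySem.Set.empty
  ((PySem.List.sorted edges (fun e => toLex e)).foldl (fun g e => pvAddEdge g e.1 e.2)
    PySem.Dict.empty).items

-- ===== PRECONDITION & SPEC =====
def Spec_build_similarity_graph (dicts : List (List (String × String))) (keys_to_check : List String) (out : List (Int × List Int)) : Prop := out = build_similarity_graph_alt dicts keys_to_check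
instance (dicts : List (List (String × String))) (keys_to_check : List String) (out : List (Int × List Int)) : Decidable (Spec_build_similarity_graph dicts keys_to_check out) := by unfold Spec_build_similarity_graph; infer_instance

-- ===== CLAIM (what is proved, stated in full; the proofs are below) =====
def Claim_equal_build_similarity_graph : Prop := ∀ (dicts : List (List (String × String))) (keys_to_check : List String), Dom_build_similarity_graph dicts keys_to_check → Spec_build_similarity_graph dicts keys_to_check (build_similarity_graph dicts keys_to_check)

-- ===== LEMMAS AND PROOFS =====

def pvD (dicts : List (List (String × String))) (j : Int) : List (String × String) :=
  PySem.List.pyGetD dicts j []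

def pvC (dicts : List (List (String × String))) (j : Int) (k : String) : PySem.Set String :=
  split_and_clean ((PySem.Dict.mk (pvD dicts j)).getD k "")

def pvP (dicts : List (List (String × String))) (keys : List String) (a b : Int) : Prop :=
  ∃ k ∈ keys, ∃ v, v ∈ pvC dicts a k ∧ v ∈ pvC dicts b k

theorem pvConnA_iff (dicts : List (List (String × String))) (keys : List String) (a b : Int) :
    pvConnA (pvD dicts a) (pvD dicts b) keys = true ↔ pvP dicts keys a b := by
  induction keys with
  | nil => simp [pvConnA, pvP]
  | cons k ks ih =>
    simp only [pvConnA]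
    by_cases h : (PySem.Set.inter (split_and_clean ((PySem.Dict.mk (pvD dicts a)).getD k ""))
          (split_and_clean ((PySem.Dict.mk (pvD dicts b)).getD k ""))) ≠ []
    · rw [if_pos h]
      obtain ⟨v, hv⟩ := List.exists_mem_of_ne_nil _ h
      rw [PySem.Set.mem_inter] at hv
      simp only [true_iff]
      exact ⟨k, List.mem_cons_self, v, hv.1, hv.2⟩
    · rw [if_neg h, ih]; simp only [pvP]
      constructor
      · rintro ⟨k', hk', v, hv1, hv2⟩
        exact ⟨k', List.mem_cons_of_mem _ hk', v, hv1, hv2⟩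
      · rintro ⟨k', hk', v, hv1, hv2⟩
        rcases List.mem_cons.1 hk' with rfl | hk'
        · exfalso
          rw [not_ne_iff] at h
          have : v ∈ ([] : List String) := by
            rw [← h, PySem.Set.mem_inter]; exact ⟨hv1, hv2⟩
          simp at this
        · exact ⟨k', hk', v, hv1, hv2⟩

def pvEA (dicts : List (List (String × String))) (keys : List String) : List (Int × Int) :=
  (PySem.List.pyRange 0 (PySem.List.len dicts)).flatMap (fun i =>
    ((PySem.List.pyRange 0 (PySem.List.len dicts)).filter
        (fun j => decide (i < j) && pvConnA (pvD dicts i) (pvD dicts j) keys)).map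
      (fun j => (i, j)))

theorem pvEA_mem (dicts : List (List (String × String))) (keys : List String) (e : Int × Int) :
    e ∈ pvEA dicts keys ↔
      0 ≤ e.1 ∧ e.1 < e.2 ∧ e.2 < (dicts.length : Int) ∧
        pvConnA (pvD dicts e.1) (pvD dicts e.2) keys = true := by
  obtain ⟨a, b⟩ := e
  simp only [pvEA, List.mem_flatMap, List.mem_map, List.mem_filter,
    PySem.List.mem_pyRange_one, Bool.and_eq_true, decide_eq_true_eq, PySem.List.len]
  constructor
  · rintro ⟨i, ⟨hi0, hin⟩, j, ⟨⟨hj0, hjn⟩, hij, hc⟩, he⟩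
    cases he
    exact ⟨hi0, hij, hjn, hc⟩
  · rintro ⟨h0, hab, hbn, hc⟩
    exact ⟨a, ⟨h0, lt_trans hab hbn⟩, b, ⟨⟨by omega, hbn⟩, hab, hc⟩, rfl⟩

theorem pvEA_pairwise (dicts : List (List (String × String))) (keys : List String) :
    List.Pairwise (fun a b => toLex a < toLex b) (pvEA dicts keys) := by
  have hr : List.Pairwise (· < ·) (PySem.List.pyRange 0 (PySem.List.len dicts)) := by
    rw [show PySem.List.len dicts = ((dicts.length : Nat) : Int) from rfl,
      PySem.List.pyRange_zero_natCast]
    exact List.pairwise_lt_range.map _ (fun a b h => by exact_mod_cast h)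
  rw [pvEA, List.pairwise_flatMap]
  constructor
  · intro i _
    apply List.Pairwise.map
    · intro j1 j2 (h : j1 < j2)
      exact Prod.Lex.toLex_lt_toLex.2 (Or.inr ⟨rfl, h⟩)
    · exact hr.filter _
  · apply hr.imp
    intro i1 i2 h x hx y hy
    simp only [List.mem_map] at hx hy
    obtain ⟨j1, _, rfl⟩ := hx
    obtain ⟨j2, _, rfl⟩ := hy
    exact Prod.Lex.toLex_lt_toLex.2 (Or.inl h)

theorem pvStepEq (keys : List String) (g : PySem.Dict Int (PySem.Set Int)) (i j : Int)
    (d1 d2 : List (String × String)) :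
    (if i ≥ j then g else if pvConnA d1 d2 keys then pvAddEdge g i j else g) =
      (if decide (i < j) && pvConnA d1 d2 keys then pvAddEdge g i j else g) := by
  by_cases h : i ≥ j
  · rw [if_pos h]
    have : decide (i < j) = false := by simp; omega
    rw [this]; simp
  · rw [if_neg h]
    have : decide (i < j) = true := by simp; omega
    rw [this, Bool.true_and]

theorem pvA_norm (dicts : List (List (String × String))) (keys : List String) :
    build_similarity_graph dicts keys =
      ((pvEA dicts keys).foldl (fun g e => pvAddEdge g e.1 e.2) PySem.Dict.empty).items := by
  rw [build_similarity_graph, pvEA,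
    PySem.List.enumerate_eq_map_pyRange dicts []]
  rw [List.foldl_map]
  simp only [List.foldl_map, pvStepEq keys]
  simp only [PySem.List.foldl_if_eq_foldl_filter]
  have hmap : ∀ (x : PySem.Dict Int (PySem.Set Int)) (y : Int) (l : List Int),
      l.foldl (fun acc j => pvAddEdge acc y j) x =
        (l.map (fun j => (y, j))).foldl (fun g e => pvAddEdge g e.1 e.2) x :=
    fun x y l => (List.foldl_map (f := fun j => (y, j)) (g := fun g e => pvAddEdge g e.1 e.2) (l := l) (init := x)).symm
  simp only [hmap]
  rw [← List.foldl_flatMap]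
  simp only [pvD]

def pvEntries (dicts : List (List (String × String))) (keys : List String) : List ((String × String) × Int) :=
  (PySem.List.enumerate dicts).flatMap (fun p =>
    keys.flatMap (fun k =>
      (split_and_clean ((PySem.Dict.mk p.2).getD k "")).map (fun v => ((k, v), p.1))))

def pvIndex (dicts : List (List (String × String))) (keys : List String) : PySem.Dict (String × String) (List Int) :=
  (pvEntries dicts keys).foldl (fun d e => d.modify e.1 [] (fun l => l ++ [e.2])) PySem.Dict.empty

def pvEdges (dicts : List (List (String × String))) (keys : List String) : PySem.Set (Int × Int) :=
  (pvIndex dicts keys).values.foldl (fun es idxs =>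
    (PySem.List.enumerate idxs).foldl (fun es p =>
      (PySem.List.slice idxs (some (p.1 + 1)) none).foldl (fun es j =>
        if p.2 ≠ j then PySem.Set.add es (min p.2 j, max p.2 j) else es) es) es)
    PySem.Set.empty

theorem pvMemFoldl {α β : Type} (step : List β → α → List β) (Q : α → β → Prop)
    (h : ∀ s a y, y ∈ step s a ↔ y ∈ s ∨ Q a y) (l : List α) (s : List β) (y : β) :
    y ∈ l.foldl step s ↔ y ∈ s ∨ ∃ a ∈ l, Q a y := by
  induction l generalizing s with
  | nil => simp
  | cons a l ih =>
    rw [List.foldl_cons, ih, h]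
    simp only [List.mem_cons]
    constructor
    · rintro ((hs | hq) | ⟨a', ha', hq⟩)
      · exact Or.inl hs
      · exact Or.inr ⟨a, Or.inl rfl, hq⟩
      · exact Or.inr ⟨a', Or.inr ha', hq⟩
    · rintro (hs | ⟨a', (rfl | ha'), hq⟩)
      · exact Or.inl (Or.inl hs)
      · exact Or.inl (Or.inr hq)
      · exact Or.inr ⟨a', ha', hq⟩

theorem pvNodupFoldl {α β : Type} (step : List β → α → List β)
    (h : ∀ s a, s.Nodup → (step s a).Nodup) (l : List α) (s : List β) (hs : s.Nodup) :
    (l.foldl step s).Nodup := by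
  induction l generalizing s with
  | nil => exact hs
  | cons a l ih => exact ih _ (h s a hs)

theorem pvEnum_mem {α : Type} (xs : List α) (d : α) (p : Int × α) :
    p ∈ PySem.List.enumerate xs ↔ 0 ≤ p.1 ∧ p.1 < (xs.length : Int) ∧ p.2 = PySem.List.pyGetD xs p.1 d := by
  obtain ⟨a, b⟩ := p
  rw [PySem.List.enumerate_eq_map_pyRange xs d]
  simp only [List.mem_map, PySem.List.mem_pyRange_one, PySem.List.len, Prod.mk.injEq]
  constructor
  · rintro ⟨j, ⟨h0, h1⟩, rfl, rfl⟩
    exact ⟨h0, h1, rfl⟩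
  · rintro ⟨h0, h1, hb⟩
    exact ⟨a, ⟨h0, h1⟩, rfl, hb.symm⟩

theorem pvEntries_mem (dicts : List (List (String × String))) (keys : List String)
    (k : String) (v : String) (i : Int) :
    ((k, v), i) ∈ pvEntries dicts keys ↔
      0 ≤ i ∧ i < (dicts.length : Int) ∧ k ∈ keys ∧ v ∈ pvC dicts i k := by
  simp only [pvEntries, List.mem_flatMap, List.mem_map, Prod.mk.injEq]
  constructor
  · rintro ⟨⟨pi, pd⟩, hp, k', hk', v', hv', ⟨rfl, rfl⟩, rfl⟩
    rw [pvEnum_mem _ ([] : List (String × String))] at hp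
    obtain ⟨h0, h1, hpd⟩ := hp
    simp only at h0 h1 hpd
    subst hpd
    exact ⟨h0, h1, hk', hv'⟩
  · rintro ⟨h0, h1, hk, hv⟩
    refine ⟨(i, pvD dicts i), ?_, k, hk, v, hv, ⟨rfl, rfl⟩, rfl⟩
    rw [pvEnum_mem _ ([] : List (String × String))]
    exact ⟨h0, h1, rfl⟩

theorem pvBucket_mem (dicts : List (List (String × String))) (keys : List String)
    (c : String × String) (a : Int) :
    a ∈ (pvIndex dicts keys).getD c [] ↔ (c, a) ∈ pvEntries dicts keys := by
  rw [pvIndex, PySem.Dict.getD_foldl_modify_append]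
  simp only [PySem.Dict.getD_empty, List.nil_append, List.mem_map, List.mem_filter, beq_iff_eq]
  constructor
  · rintro ⟨e, ⟨he, hc⟩, rfl⟩
    obtain ⟨c', a'⟩ := e
    cases hc
    exact he
  · intro h
    exact ⟨(c, a), ⟨h, rfl⟩, rfl⟩

theorem pvEdgesRaw_mem (dicts : List (List (String × String))) (keys : List String) (y : Int × Int) :
    y ∈ pvEdges dicts keys ↔
      ∃ idxs ∈ (pvIndex dicts keys).values, ∃ p ∈ PySem.List.enumerate idxs,
        ∃ j ∈ PySem.List.slice idxs (some (p.1 + 1)) none,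
          p.2 ≠ j ∧ y = (min p.2 j, max p.2 j) := by
  rw [pvEdges, pvMemFoldl _
    (fun idxs y => ∃ p ∈ PySem.List.enumerate idxs,
        ∃ j ∈ PySem.List.slice idxs (some (p.1 + 1)) none,
          p.2 ≠ j ∧ y = (min p.2 j, max p.2 j))]
  · simp [PySem.Set.empty]
  · intro s idxs y
    rw [pvMemFoldl _
      (fun p y => ∃ j ∈ PySem.List.slice idxs (some (p.1 + 1)) none,
          p.2 ≠ j ∧ y = (min p.2 j, max p.2 j))]
    intro s p y
    rw [pvMemFoldl _ (fun j y => p.2 ≠ j ∧ y = (min p.2 j, max p.2 j))]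
    intro s j y
    by_cases hij : p.2 ≠ j
    · rw [if_pos hij, PySem.Set.mem_add]
      tauto
    · rw [if_neg hij]
      tauto

theorem pvValues_get (dicts : List (List (String × String))) (keys : List String)
    (idxs : List Int) (h : idxs ∈ (pvIndex dicts keys).values) :
    ∃ c, (pvIndex dicts keys).getD c [] = idxs := by
  have hnd : (pvIndex dicts keys).keys.Nodup := by
    rw [pvIndex]
    exact PySem.Dict.nodup_keys_foldl_modify_key (pvEntries dicts keys)
      (fun (e : (String × String) × Int) => e.1) []
      (fun _ (e : (String × String) × Int) => (fun l => l ++ [e.2])) PySem.Dict.empty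
      PySem.Dict.nodup_keys_empty
  rw [show (pvIndex dicts keys).values = (pvIndex dicts keys).items.map (fun p => p.2) from rfl] at h
  obtain ⟨⟨c, l⟩, hm, rfl⟩ := List.mem_map.1 h
  refine ⟨c, ?_⟩
  rw [PySem.Dict.getD_eq_get?_getD, PySem.Dict.get?_of_mem_items _ hm hnd]
  rfl

theorem pvGet_values (dicts : List (List (String × String))) (keys : List String)
    (c : String × String) (a : Int) (h : a ∈ (pvIndex dicts keys).getD c []) :
    (pvIndex dicts keys).getD c [] ∈ (pvIndex dicts keys).values := by
  rw [PySem.Dict.getD_eq_get?_getD] at h ⊢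
  cases hg : (pvIndex dicts keys).get? c with
  | none => rw [hg] at h; simp at h
  | some l =>
    simp only [Option.getD_some]
    have := PySem.Dict.mem_items_of_get?_eq_some _ hg
    exact List.mem_map_of_mem this

theorem pvEmitAt (idxs : List Int) (p q : Nat) (hp : p < idxs.length) (hq : q < idxs.length)
    (hpq : p < q) :
    ((p : Int), idxs[p]) ∈ PySem.List.enumerate idxs ∧
      idxs[q] ∈ PySem.List.slice idxs (some ((p : Int) + 1)) none := by
  constructor
  · rw [pvEnum_mem idxs 0]
    refine ⟨Int.natCast_nonneg p, by show (p : Int) < (idxs.length : Int); exact_mod_cast hp, ?_⟩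
    rw [PySem.List.pyGetD_eq_getElem idxs 0 (by show (0:Int) ≤ (p:Int); positivity)
      (by show (p : Int) < (idxs.length : Int); exact_mod_cast hp)]
    simp
  · rw [show ((p : Int) + 1) = ((p + 1 : Nat) : Int) by push_cast; ring,
      PySem.List.slice_from idxs (by positivity)]
    rw [Int.toNat_natCast]
    have hlen : q - (p + 1) < (idxs.drop (p + 1)).length := by
      rw [List.length_drop]; omega
    have : idxs[q] = (idxs.drop (p + 1))[q - (p + 1)]'hlen := by
      rw [List.getElem_drop]
      congr 1
      omega
    rw [this]
    exact List.getElem_mem hlen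

theorem pvEnum_snd_mem (idxs : List Int) (p : Int × Int) (hp : p ∈ PySem.List.enumerate idxs) :
    p.2 ∈ idxs := by
  rw [pvEnum_mem idxs 0] at hp
  obtain ⟨h0, h1, h2⟩ := hp
  rw [h2, PySem.List.pyGetD_eq_getElem idxs 0 h0 h1]
  exact List.getElem_mem _

theorem pvSlice_mem (idxs : List Int) (p : Int) (j : Int) (hp : 0 ≤ p)
    (hj : j ∈ PySem.List.slice idxs (some (p + 1)) none) : j ∈ idxs := by
  rw [PySem.List.slice_from idxs (by omega)] at hj
  exact List.mem_of_mem_drop hj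

theorem pvBucket_both (dicts : List (List (String × String))) (keys : List String)
    (i j : Int) (c : String × String)
    (hi : i ∈ (pvIndex dicts keys).getD c []) (hj : j ∈ (pvIndex dicts keys).getD c []) :
    0 ≤ i ∧ i < (dicts.length : Int) ∧ 0 ≤ j ∧ j < (dicts.length : Int) ∧ pvP dicts keys i j := by
  obtain ⟨k, v⟩ := c
  rw [pvBucket_mem, pvEntries_mem] at hi hj
  exact ⟨hi.1, hi.2.1, hj.1, hj.2.1, k, hi.2.2.1, v, hi.2.2.2, hj.2.2.2⟩

theorem pvEdges_mem (dicts : List (List (String × String))) (keys : List String) (e : Int × Int) :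
    e ∈ pvEdges dicts keys ↔
      0 ≤ e.1 ∧ e.1 < e.2 ∧ e.2 < (dicts.length : Int) ∧ pvP dicts keys e.1 e.2 := by
  obtain ⟨a, b⟩ := e
  rw [pvEdgesRaw_mem]
  constructor
  · rintro ⟨idxs, hvals, p, hpenum, j, hjsl, hij, he⟩
    have hp0 : 0 ≤ p.1 := ((pvEnum_mem idxs 0 p).1 hpenum).1
    have hi : p.2 ∈ idxs := pvEnum_snd_mem idxs p hpenum
    have hj : j ∈ idxs := pvSlice_mem idxs p.1 j hp0 hjsl
    obtain ⟨c, hc⟩ := pvValues_get dicts keys idxs hvals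
    rw [← hc] at hi hj
    obtain ⟨h0i, h1i, h0j, h1j, hP⟩ := pvBucket_both dicts keys p.2 j c hi hj
    obtain ⟨rfl, rfl⟩ := Prod.mk.injEq .. ▸ he
    rcases lt_or_gt_of_ne hij with h | h
    · rw [min_eq_left h.le, max_eq_right h.le]
      exact ⟨h0i, h, h1j, hP⟩
    · rw [min_eq_right h.le, max_eq_left h.le]
      obtain ⟨k, hk, v, hv1, hv2⟩ := hP
      exact ⟨h0j, h, h1i, k, hk, v, hv2, hv1⟩
  · rintro ⟨h0, hab, hbn, k, hk, v, hva, hvb⟩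
    have ha : a ∈ (pvIndex dicts keys).getD (k, v) [] := by
      rw [pvBucket_mem, pvEntries_mem]
      exact ⟨h0, lt_trans hab hbn, hk, hva⟩
    have hb : b ∈ (pvIndex dicts keys).getD (k, v) [] := by
      rw [pvBucket_mem, pvEntries_mem]
      exact ⟨by omega, hbn, hk, hvb⟩
    have hvals := pvGet_values dicts keys (k, v) a ha
    set idxs := (pvIndex dicts keys).getD (k, v) [] with hidxs
    obtain ⟨pa, hpa, hea⟩ := List.getElem_of_mem ha
    obtain ⟨pb, hpb, heb⟩ := List.getElem_of_mem hb
    have hne : pa ≠ pb := by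
      intro hcon
      subst hcon
      rw [hea] at heb
      omega
    rcases Nat.lt_or_ge pa pb with h | h
    · obtain ⟨h1, h2⟩ := pvEmitAt idxs pa pb hpa hpb h
      refine ⟨idxs, hvals, ((pa : Int), idxs[pa]), h1, idxs[pb], h2, ?_, ?_⟩
      · simp only; omega
      · simp only
        rw [hea, heb, min_eq_left hab.le, max_eq_right hab.le]
    · have h' : pb < pa := by omega
      obtain ⟨h1, h2⟩ := pvEmitAt idxs pb pa hpb hpa h'
      refine ⟨idxs, hvals, ((pb : Int), idxs[pb]), h1, idxs[pa], h2, ?_, ?_⟩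
      · simp only; omega
      · simp only
        rw [hea, heb, min_eq_right hab.le, max_eq_left hab.le]

theorem pvEdges_nodup (dicts : List (List (String × String))) (keys : List String) :
    (pvEdges dicts keys).Nodup := by
  rw [pvEdges]
  apply pvNodupFoldl
  · intro s idxs hs
    apply pvNodupFoldl
    · intro s p hp
      apply pvNodupFoldl
      · intro s j hj
        by_cases hij : p.2 ≠ j
        · rw [if_pos hij]
          exact PySem.Set.nodup_add s _ hj
        · rw [if_neg hij]
          exact hj
      · exact hp
    · exact hs
  · exact List.nodup_nil

theorem pvB_norm (dicts : List (List (String × String))) (keys : List String) :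
    build_similarity_graph_alt dicts keys =
      ((PySem.List.sorted (pvEdges dicts keys) (fun e => toLex e)).foldl
        (fun g e => pvAddEdge g e.1 e.2) PySem.Dict.empty).items := rfl

-- ===== VERDICT (by name: the statement is the Claim_ definition above) =====
theorem build_similarity_graph_spec : Claim_equal_build_similarity_graph := by
  intro dicts keys _
  unfold Spec_build_similarity_graph
  rw [pvA_norm, pvB_norm]
  have hpw := pvEA_pairwise dicts keys
  have hnodupA : (pvEA dicts keys).Nodup :=
    hpw.imp (fun {a b} h => by exact fun he => absurd (he ▸ h) (lt_irrefl _))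
  have hperm : (pvEA dicts keys).Perm (pvEdges dicts keys) := by
    rw [List.perm_ext_iff_of_nodup hnodupA (pvEdges_nodup dicts keys)]
    intro e
    rw [pvEA_mem, pvEdges_mem, pvConnA_iff]
  rw [PySem.List.sorted_eq_of_perm_of_pairwise_lt (pvEdges dicts keys) (pvEA dicts keys) _ hperm hpw]
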